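-- pv_equiv track=rewrite | github.com/jdrprod/cpp-global-align | src/test.py | find
-- ===== SOURCE A (Python) =====
-- mat = [
--     [0,  -1,  -2,  -3],
--     [-1,   3,   1,  -1],
--     [-2,   1,   6,   4],
--     [-3,  -1,   4,   5],
--     [-4,  -3,   2,   3]
-- ]
--
-- def find(M, i, j, A, B, top, sid):
--     pos = []
--     n = 0
--
--     if i > 0 and j > 0:
--         if mat[i][j] == mat[i-1][j] - 2:
--             A1 = sid[i-1] + A
--             B1 = '-' + B
--             pos += find(M, i-1, j, A1, B1, top, sid)
--
--         if mat[i][j] == mat[i][j-1] - 2: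
--             A2 = '-' + A
--             B2 = top[j-1] + B
--             pos += find(M, i, j-1, A2, B2, top, sid)
--
--         if mat[i][j] in (mat[i-1][j-1]-1, mat[i-1][j-1]+3):
--             A3 = sid[i-1] + A
--             B3 = top[j-1] + B
--             pos += find(M, i-1, j-1, A3, B3, top, sid)
--
--         return pos
--     else:
--         while i > 0:
--             A = sid[i-1] + A
--             B = '-' + B
--             i -= 1
--
--         while j > 0:
--             A = '-' + A
--             B = top[j-1] + B
--             j -= 1
--
--         return [(A, B)]
-- ===== SOURCE B (Python) =====
-- mat = [
--     [0,  -1,  -2,  -3],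
--     [-1,   3,   1,  -1],
--     [-2,   1,   6,   4],
--     [-3,  -1,   4,   5],
--     [-4,  -3,   2,   3]
-- ]
--
-- def find(M, i, j, A, B, top, sid):
--     # Iterative DFS with an explicit stack of frames instead of recursion.
--     res = []
--     stack = [(i, j, A, B)]
--     while stack:
--         i, j, A, B = stack.pop()
--         if i > 0 and j > 0:
--             # push children in reverse (diagonal, left, up) so that they are
--             # popped in the original up -> left -> diagonal order
--             if mat[i][j] in (mat[i-1][j-1] - 1, mat[i-1][j-1] + 3):
--                 stack.append((i-1, j-1, sid[i-1] + A, top[j-1] + B))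
--             if mat[i][j] == mat[i][j-1] - 2:
--                 stack.append((i, j-1, '-' + A, top[j-1] + B))
--             if mat[i][j] == mat[i-1][j] - 2:
--                 stack.append((i-1, j, sid[i-1] + A, '-' + B))
--         else:
--             while i > 0:
--                 A = sid[i-1] + A
--                 B = '-' + B
--                 i -= 1
--             while j > 0:
--                 A = '-' + A
--                 B = top[j-1] + B
--                 j -= 1
--             res.append((A, B))
--     return res
-- ===== Notes on version B (the rewrite author's own statement) =====
-- stated objective: alternative
-- what changed: Replaces A's recursive backtracking with an iterative depth-first search over an explicit stack of (i, j, A, B) frames, pushing children in reverse (diagonal, left, up) so results come out in A's exact order.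
import Mathlib
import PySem

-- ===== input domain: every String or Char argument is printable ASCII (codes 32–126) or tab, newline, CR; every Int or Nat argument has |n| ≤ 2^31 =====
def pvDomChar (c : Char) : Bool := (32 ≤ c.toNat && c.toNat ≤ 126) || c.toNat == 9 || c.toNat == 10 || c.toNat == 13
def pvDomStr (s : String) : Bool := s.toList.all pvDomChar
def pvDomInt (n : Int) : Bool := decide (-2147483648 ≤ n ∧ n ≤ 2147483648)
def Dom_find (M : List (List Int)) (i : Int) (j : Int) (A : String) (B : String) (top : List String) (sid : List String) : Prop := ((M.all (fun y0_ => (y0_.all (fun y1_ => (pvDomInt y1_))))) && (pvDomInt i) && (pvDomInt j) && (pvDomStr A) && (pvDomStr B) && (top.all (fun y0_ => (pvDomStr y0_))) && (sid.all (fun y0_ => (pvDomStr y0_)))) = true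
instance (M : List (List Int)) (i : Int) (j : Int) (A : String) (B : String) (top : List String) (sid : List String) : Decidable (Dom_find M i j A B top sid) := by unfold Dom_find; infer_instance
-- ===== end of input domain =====

-- B replaces A's recursive backtracking by an iterative depth-first search over an
-- explicit stack of (i, j, A, B) frames (children pushed in reverse order);
-- alternative decomposition, same results in the same order.

-- ===== PORT A =====
-- the module-level global `mat` both programs read (the parameter M is never used)
def pvMat : List (List Int) := [[0,-1,-2,-3],[-1,3,1,-1],[-2,1,6,4],[-3,-1,4,5],[-4,-3,2,3]]
-- mat[i][j]; indices are in range under Pre_find, where pyGetD is exact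
def matG (i j : Int) : Int := PySem.List.pyGetD (PySem.List.pyGetD pvMat i []) j 0
-- xs[k] for a list of strings; in range under Pre_find
def strG (xs : List String) (k : Int) : String := PySem.List.pyGetD xs k ""

-- first while-loop:  while i > 0: A = sid[i-1] + A; B = '-' + B; i -= 1
def drainRows : Nat → List String → String → String → String × String
  | 0, _, A, B => (A, B)
  | k+1, sid, A, B => drainRows k sid (strG sid (k : Int) ++ A) ("-" ++ B)

-- second while-loop: while j > 0: A = '-' + A; B = top[j-1] + B; j -= 1
def drainCols : Nat → List String → String → String → String × String
  | 0, _, A, B => (A, B)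
  | k+1, top, A, B => drainCols k top ("-" ++ A) (strG top (k : Int) ++ B)

-- the i==0-or-j==0 branch (the two while-loops, then the single pair); this code
-- is textually identical in A and in Source B's base case, so both ports share it
def findBase (i j : Int) (A B : String) (top sid : List String) : List (String × String) :=
  let p := drainRows i.toNat sid A B
  [drainCols j.toNat top p.1 p.2]

-- A's recursion, with an explicit fuel bound i.toNat + j.toNat on the recursion
-- depth (a totality guard only: the 0-arm is reached only when i ≤ 0 or j ≤ 0,
-- where it computes exactly the else-branch)
def findF : Nat → List (List Int) → Int → Int → String → String → List String → List String → List (String × String)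
  | 0, _, i, j, A, B, top, sid => findBase i j A B top sid
  | fuel+1, M, i, j, A, B, top, sid =>
    if i > 0 ∧ j > 0 then
      let pos : List (String × String) := []
      let pos := if matG i j = matG (i-1) j - 2 then
          pos ++ findF fuel M (i-1) j (strG sid (i-1) ++ A) ("-" ++ B) top sid else pos
      let pos := if matG i j = matG i (j-1) - 2 then
          pos ++ findF fuel M i (j-1) ("-" ++ A) (strG top (j-1) ++ B) top sid else pos
      let pos := if matG i j = matG (i-1) (j-1) - 1 ∨ matG i j = matG (i-1) (j-1) + 3 then
          pos ++ findF fuel M (i-1) (j-1) (strG sid (i-1) ++ A) (strG top (j-1) ++ B) top sid else pos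
      pos
    else findBase i j A B top sid

def find (M : List (List Int)) (i : Int) (j : Int) (A : String) (B : String) (top : List String) (sid : List String) : List (String × String) :=
  findF (i.toNat + j.toNat) M i j A B top sid

-- ===== PORT B =====
-- the three conditional pushes of Source B; the head of the list is the top of the
-- stack, so pushing diagonal, then left, then up leaves up first, diagonal last
def pushChildren (top sid : List String) (i j : Int) (A B : String) :
    List (Int × Int × String × String) :=
  (if matG i j = matG (i-1) j - 2 then [(i-1, j, strG sid (i-1) ++ A, "-" ++ B)] else []) ++
  (if matG i j = matG i (j-1) - 2 then [(i, j-1, "-" ++ A, strG top (j-1) ++ B)] else []) ++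
  (if matG i j = matG (i-1) (j-1) - 1 ∨ matG i j = matG (i-1) (j-1) + 3 then
     [(i-1, j-1, strG sid (i-1) ++ A, strG top (j-1) ++ B)] else [])

-- fuel weight of a frame: an upper bound on the loop iterations it can cause
def frameW (f : Int × Int × String × String) : Nat := 4 ^ (f.1.toNat + f.2.1.toNat)

-- the `while stack:` loop of Source B, with fuel (a totality guard only: the 0-arm
-- is unreachable from find_alt's initial fuel); Source B's base case is the same two
-- while-loops as A's, shared as findBase
def stepAltF (M : List (List Int)) (top sid : List String) :
    Nat → List (Int × Int × String × String) → List (String × String) → List (String × String)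
  | _, [], res => res
  | 0, _, res => res
  | fuel+1, (i, j, A, B) :: stack, res =>
    if i > 0 ∧ j > 0 then
      stepAltF M top sid fuel (pushChildren top sid i j A B ++ stack) res
    else
      stepAltF M top sid fuel stack (res ++ findBase i j A B top sid)

def find_alt (M : List (List Int)) (i : Int) (j : Int) (A : String) (B : String) (top : List String) (sid : List String) : List (String × String) :=
  stepAltF M top sid (frameW (i, j, A, B)) [(i, j, A, B)] []

-- ===== PRECONDITION & SPEC =====
-- Pre_find is exactly the set of inputs on which the Python A returns normally:
-- outside it some mat[i][j], sid[i-1] or top[j-1] access raises IndexError.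
def Pre_find (M : List (List Int)) (i : Int) (j : Int) (A : String) (B : String) (top : List String) (sid : List String) : Prop :=
  (0 < i → i ≤ (sid.length : Int)) ∧ (0 < j → j ≤ (top.length : Int)) ∧
  (0 < i ∧ 0 < j → i ≤ 4 ∧ j ≤ 3)
instance (M : List (List Int)) (i : Int) (j : Int) (A : String) (B : String) (top : List String) (sid : List String) : Decidable (Pre_find M i j A B top sid) := by unfold Pre_find; infer_instance

def pvWitness_find : List (List Int) × Int × Int × String × String × List String × List String :=
  ([], 2, 2, "", "", ["a", "b"], ["c", "d"])

def Spec_find (M : List (List Int)) (i : Int) (j : Int) (A : String) (B : String) (top : List String) (sid : List String) (out : List (String × String)) : Prop := out = find_alt M i j A B top sid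
instance (M : List (List Int)) (i : Int) (j : Int) (A : String) (B : String) (top : List String) (sid : List String) (out : List (String × String)) : Decidable (Spec_find M i j A B top sid out) := by unfold Spec_find; infer_instance

-- ===== CLAIM (what is proved, stated in full; the proofs are below) =====
def Claim_equal_find : Prop := ∀ (M : List (List Int)) (i : Int) (j : Int) (A : String) (B : String) (top : List String) (sid : List String), Dom_find M i j A B top sid → Pre_find M i j A B top sid → Spec_find M i j A B top sid (find M i j A B top sid)

-- ===== LEMMAS AND PROOFS =====
lemma frameW_pos (f : Int × Int × String × String) : 0 < frameW f := by
  unfold frameW; positivity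

-- the stack measure strictly drops when a frame is replaced by its children
lemma pushChildren_dec (top sid : List String) (i j : Int) (A B : String)
    (stack : List (Int × Int × String × String)) (h : i > 0 ∧ j > 0) :
    ((pushChildren top sid i j A B ++ stack).map frameW).sum
      < (((i, j, A, B) :: stack).map frameW).sum := by
  obtain ⟨hi, hj⟩ := h
  obtain ⟨k, hk⟩ : ∃ k, i.toNat + j.toNat = k + 2 := ⟨i.toNat + j.toNat - 2, by omega⟩
  have e1 : (i-1).toNat + j.toNat = k + 1 := by omega
  have e2 : i.toNat + (j-1).toNat = k + 1 := by omega
  have e3 : (i-1).toNat + (j-1).toNat = k := by omega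
  have hpos : 0 < 4 ^ k := by positivity
  simp only [pushChildren]
  split_ifs <;>
    simp only [List.map_append, List.sum_append, List.map_cons, List.map_nil, List.sum_cons,
      List.sum_nil, frameW, e1, e2, e3, hk, pow_succ] <;> omega

-- fuel irrelevance for A's recursion: any fuel ≥ i.toNat + j.toNat computes the same
lemma findF_eq (M : List (List Int)) (top sid : List String) :
    ∀ (f1 f2 : Nat) (i j : Int) (A B : String), i.toNat + j.toNat ≤ f1 →
      i.toNat + j.toNat ≤ f2 → findF f1 M i j A B top sid = findF f2 M i j A B top sid := by
  intro f1
  induction f1 with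
  | zero =>
    intro f2 i j A B h1 _
    have hc : ¬(i > 0 ∧ j > 0) := by omega
    cases f2 with
    | zero => rfl
    | succ m => simp only [findF, if_neg hc]
  | succ n ih =>
    intro f2 i j A B h1 h2
    by_cases hc : i > 0 ∧ j > 0
    · obtain ⟨n2, rfl⟩ : ∃ m, f2 = m + 1 := ⟨f2 - 1, by omega⟩
      simp only [findF, if_pos hc]
      rw [ih n2 (i-1) j _ _ (by omega) (by omega), ih n2 i (j-1) _ _ (by omega) (by omega),
        ih n2 (i-1) (j-1) _ _ (by omega) (by omega)]
    · cases f2 with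
      | zero => simp only [findF, if_neg hc]
      | succ m => simp only [findF, if_neg hc]

lemma find_base (M : List (List Int)) (i j : Int) (A B : String) (top sid : List String)
    (hc : ¬(i > 0 ∧ j > 0)) : find M i j A B top sid = findBase i j A B top sid := by
  unfold find
  cases h : i.toNat + j.toNat with
  | zero => rfl
  | succ n => simp only [findF, if_neg hc]

-- one unfolding of A in the recursive case, phrased over `find` itself
lemma find_cons (M : List (List Int)) (i j : Int) (A B : String) (top sid : List String)
    (hc : i > 0 ∧ j > 0) :
    find M i j A B top sid =
      (if matG i j = matG (i-1) j - 2 then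
        find M (i-1) j (strG sid (i-1) ++ A) ("-" ++ B) top sid else []) ++
      (if matG i j = matG i (j-1) - 2 then
        find M i (j-1) ("-" ++ A) (strG top (j-1) ++ B) top sid else []) ++
      (if matG i j = matG (i-1) (j-1) - 1 ∨ matG i j = matG (i-1) (j-1) + 3 then
        find M (i-1) (j-1) (strG sid (i-1) ++ A) (strG top (j-1) ++ B) top sid else []) := by
  obtain ⟨hi, hj⟩ := hc
  unfold find
  obtain ⟨k, hk⟩ : ∃ k, i.toNat + j.toNat = k + 1 := ⟨i.toNat + j.toNat - 1, by omega⟩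
  rw [hk]
  simp only [findF, if_pos (⟨hi, hj⟩ : i > 0 ∧ j > 0)]
  rw [findF_eq M top sid k ((i-1).toNat + j.toNat) (i-1) j _ _ (by omega) (by omega),
    findF_eq M top sid k (i.toNat + (j-1).toNat) i (j-1) _ _ (by omega) (by omega),
    findF_eq M top sid k ((i-1).toNat + (j-1).toNat) (i-1) (j-1) _ _ (by omega) (by omega)]
  split_ifs <;> simp

-- loop invariant: with enough fuel, the stack machine appends, in order, the
-- result of A's recursion on every frame still on the stack
lemma stepAltF_spec (M : List (List Int)) (top sid : List String) :
    ∀ (fuel : Nat) (st : List (Int × Int × String × String)) (res : List (String × String)),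
      (st.map frameW).sum ≤ fuel →
      stepAltF M top sid fuel st res
        = res ++ (st.map (fun f => find M f.1 f.2.1 f.2.2.1 f.2.2.2 top sid)).flatten := by
  intro fuel
  induction fuel with
  | zero =>
    intro st res h
    cases st with
    | nil => simp [stepAltF]
    | cons f st' =>
      exfalso
      have := frameW_pos f
      simp only [List.map_cons, List.sum_cons] at h
      omega
  | succ n ih =>
    intro st res h
    cases st with
    | nil => simp [stepAltF]
    | cons f st' =>
      obtain ⟨i, j, A, B⟩ := f
      by_cases hc : i > 0 ∧ j > 0
      · rw [stepAltF, if_pos hc,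
          ih _ _ (by have hdec := pushChildren_dec top sid i j A B st' hc
                     simp only [List.map_cons, List.sum_cons] at h hdec ⊢; omega)]
        simp only [List.map_append, List.flatten_append, List.map_cons, List.flatten_cons]
        congr 1
        rw [find_cons M i j A B top sid hc]
        simp only [pushChildren]
        split_ifs <;> simp
      · rw [stepAltF, if_neg hc,
          ih _ _ (by have := frameW_pos (i, j, A, B)
                     simp only [List.map_cons, List.sum_cons] at h; omega)]
        simp only [List.map_cons, List.flatten_cons]
        rw [find_base M i j A B top sid hc]
        simp

-- ===== VERDICT (by name: the statement is the Claim_ definition above) =====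
theorem find_spec : Claim_equal_find := by
  intro M i j A B top sid _ _
  unfold Spec_find find_alt
  rw [stepAltF_spec M top sid _ _ _ (by simp)]
  simp
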